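-- pv_equiv track=rewrite | github.com/Piasy/HikBoxPictures | tests/people_gallery/test_people_gallery_fixture.py | _bucket_files_by_month
-- ===== SOURCE A (Python) =====
-- from collections import Counter, defaultdict
-- from typing import Any
--
-- def _bucket_files_by_month(assets: Any) -> dict[str, list[str]]:
--     buckets: dict[str, list[str]] = defaultdict(list)
--     for asset in assets:
--         buckets[asset["capture_month"]].append(asset["file"])
--     return {
--         month: sorted(file_names)
--         for month, file_names in sorted(buckets.items())
--     }
-- ===== SOURCE B (Python) =====
-- def _bucket_files_by_month(assets):
--     out: dict[str, list[str]] = {}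
--     for asset in sorted(assets, key=lambda a: (a["capture_month"], a["file"])):
--         out.setdefault(asset["capture_month"], []).append(asset["file"])
--     return out
-- ===== Notes on version B (the rewrite author's own statement) =====
-- stated objective: alternative
-- what changed: A buckets unsorted then sorts the month keys and each per-month file list separately; B does ONE composite sort of the assets by (capture_month, file) and then a single grouping pass whose dict needs no further sorting.
import Mathlib
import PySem

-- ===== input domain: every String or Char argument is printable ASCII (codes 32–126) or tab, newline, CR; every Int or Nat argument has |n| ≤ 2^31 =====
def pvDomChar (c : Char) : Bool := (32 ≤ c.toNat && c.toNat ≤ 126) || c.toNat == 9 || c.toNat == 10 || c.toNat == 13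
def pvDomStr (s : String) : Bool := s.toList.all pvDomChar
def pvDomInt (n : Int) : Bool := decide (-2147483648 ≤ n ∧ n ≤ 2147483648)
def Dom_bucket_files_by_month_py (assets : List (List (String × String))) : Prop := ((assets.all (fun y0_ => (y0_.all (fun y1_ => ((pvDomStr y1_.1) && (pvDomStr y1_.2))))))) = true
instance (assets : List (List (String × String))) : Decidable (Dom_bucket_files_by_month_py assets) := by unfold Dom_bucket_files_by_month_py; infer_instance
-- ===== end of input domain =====

-- B replaces A's bucket-then-sort-twice shape by one composite sort of the assets followed by a
-- single grouping pass (objective: alternative decomposition, same asymptotic cost).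

-- asset[k] for the Python dicts in `assets` (built from the association lists, last value wins,
-- like Python's dict constructor); the "" default is never reached on inputs satisfying Pre_,
-- which requires both keys to be present.
def pvItem (asset : List (String × String)) (k : String) : String :=
  (PySem.Dict.ofList asset).getD k ""

-- ===== PORT A =====
-- buckets = defaultdict(list); for asset: buckets[asset["capture_month"]].append(asset["file"]);
-- then {month: sorted(files) for month, files in sorted(buckets.items())}.  sorted(buckets.items())
-- compares (month, files) tuples, but the months (dict keys) are pairwise distinct, so sorting the
-- items by the month component alone is exact.
def bucket_files_by_month_py (assets : List (List (String × String))) : List (String × List String) :=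
  let buckets : PySem.Dict String (List String) :=
    assets.foldl
      (fun d asset => d.modify (pvItem asset "capture_month") [] (fun fs => fs ++ [pvItem asset "file"]))
      PySem.Dict.empty
  (PySem.List.sorted buckets.items (fun p => p.1) false).map
    (fun p => (p.1, PySem.List.sorted p.2 (fun f => f) false))

-- ===== PORT B =====
-- for asset in sorted(assets, key=lambda a: (a["capture_month"], a["file"])):
--     out.setdefault(asset["capture_month"], []).append(asset["file"])
-- Dict.modify k [] (· ++ [v]) is exactly out.setdefault(k, []).append(v).
def bucket_files_by_month_py_alt (assets : List (List (String × String))) : List (String × List String) :=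
  ((PySem.List.sorted2 assets (fun a => pvItem a "capture_month") (fun a => pvItem a "file") false).foldl
      (fun d asset => d.modify (pvItem asset "capture_month") [] (fun fs => fs ++ [pvItem asset "file"]))
      PySem.Dict.empty).items

-- ===== PRECONDITION & SPEC =====
-- Pre_ excludes exactly the inputs where some asset lacks the "capture_month" or "file" key, on
-- which the Python A raises KeyError (as does B).
def Pre_bucket_files_by_month_py (assets : List (List (String × String))) : Prop :=
  ∀ asset ∈ assets, "capture_month" ∈ asset.map Prod.fst ∧ "file" ∈ asset.map Prod.fst
instance (assets : List (List (String × String))) : Decidable (Pre_bucket_files_by_month_py assets) := by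
  unfold Pre_bucket_files_by_month_py; infer_instance

def pvWitness_bucket_files_by_month_py : (List (List (String × String))) :=
  [[("capture_month", "2024-01"), ("file", "b.jpg")], [("capture_month", "2024-01"), ("file", "a.jpg")]]

def Spec_bucket_files_by_month_py (assets : List (List (String × String))) (out : List (String × List String)) : Prop := out = bucket_files_by_month_py_alt assets
instance (assets : List (List (String × String))) (out : List (String × List String)) : Decidable (Spec_bucket_files_by_month_py assets out) := by unfold Spec_bucket_files_by_month_py; infer_instance

-- ===== CLAIM (what is proved, stated in full; the proofs are below) =====
def Claim_equal_bucket_files_by_month_py : Prop := ∀ (assets : List (List (String × String))), Dom_bucket_files_by_month_py assets → Pre_bucket_files_by_month_py assets → Spec_bucket_files_by_month_py assets (bucket_files_by_month_py assets)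

-- ===== LEMMAS AND PROOFS =====

-- the (month, file) pair of an asset, and the grouping step both ports fold with
def pvKey2 (a : List (String × String)) : String × String :=
  (pvItem a "capture_month", pvItem a "file")
def pvGrp (d : PySem.Dict String (List String)) (p : String × String) : PySem.Dict String (List String) :=
  d.modify p.1 [] (fun fs => fs ++ [p.2])

theorem pv_pairwise_lt_of_le_nodup {α : Type} [PartialOrder α] {l : List α}
    (hle : l.Pairwise (fun a b => a ≤ b)) (hnd : l.Nodup) :
    l.Pairwise (fun a b => a < b) := by
  induction l with
  | nil => exact List.Pairwise.nil
  | cons x t ih =>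
    rcases hle with _ | ⟨hx, ht⟩
    rcases hnd with _ | ⟨hnx, hnt⟩
    exact List.Pairwise.cons
      (fun b hb => lt_of_le_of_ne (hx b hb) (fun h => hnx b hb h)) (ih ht hnt)

theorem pv_ofList_sublist {α : Type} [BEq α] [LawfulBEq α] (xs : List α) :
    (PySem.Set.ofList xs).Sublist xs := by
  induction xs with
  | nil => simp [PySem.Set.ofList]
  | cons x t ih =>
    rw [PySem.Set.ofList_cons]
    simp only [PySem.Set.discard]
    exact List.Sublist.cons₂ x (List.filter_sublist.trans ih)

-- sorted2 with two string keys IS sorted with the lexicographic key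
theorem pv_sorted2_eq_sorted_lex {α : Type} (xs : List α) (k1 k2 : α → String) :
    PySem.List.sorted2 xs k1 k2 false
      = PySem.List.sorted xs (fun a => toLex (k1 a, k2 a)) false := by
  have hb : ∀ a b : α,
      (decide (k1 a < k1 b) || (!decide (k1 b < k1 a) && decide (k2 a < k2 b)))
        = decide (toLex (k1 a, k2 a) < toLex (k1 b, k2 b)) := by
    intro a b
    rcases lt_trichotomy (k1 a) (k1 b) with h | h | h
    · simp [h, Prod.Lex.lt_iff]
    · simp [h, Prod.Lex.lt_iff]
    · simp [h, lt_asymm h, ne_of_gt h, Prod.Lex.lt_iff]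
  have hb' : (fun a b => (decide (k1 a < k1 b) || (!decide (k1 b < k1 a) && decide (k2 a < k2 b))))
      = (fun a b => decide (toLex (k1 a, k2 a) < toLex (k1 b, k2 b))) :=
    funext fun a => funext fun b => hb a b
  show List.foldl (fun acc x => PySem.List.insertBy
      (fun a b => (decide (k1 a < k1 b) || (!decide (k1 b < k1 a) && decide (k2 a < k2 b)))) x acc) [] xs
    = List.foldl (fun acc x => PySem.List.insertBy
      (fun a b => decide (toLex (k1 a, k2 a) < toLex (k1 b, k2 b))) x acc) [] xs
  rw [hb']

-- grouping a list of (month, file) pairs: the dict's items, in closed form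
theorem pv_group_items (l : List (String × String)) :
    (l.foldl pvGrp PySem.Dict.empty).items
      = (PySem.Set.ofList (l.map (fun p => p.1))).map
          (fun m => (m, (l.filter (fun p => p.1 == m)).map (fun p => p.2))) := by
  have hgrp : (fun (d : PySem.Dict String (List String)) (p : String × String) =>
      d.modify p.1 [] (fun fs => fs ++ [p.2])) = pvGrp := rfl
  have hkeys : (l.foldl pvGrp PySem.Dict.empty).keys = PySem.Set.ofList (l.map (fun p => p.1)) := by
    rw [← hgrp]
    rw [PySem.Dict.keys_foldl_modify_key l (fun p => p.1) [] (fun _ p => (fun fs => fs ++ [p.2]))]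
    exact PySem.Set.update_empty _
  have hnd : (l.foldl pvGrp PySem.Dict.empty).keys.Nodup := by
    rw [hkeys]; exact PySem.Set.nodup_ofList _
  rw [PySem.Dict.items_eq_map_keys _ hnd []]
  rw [hkeys]
  refine List.map_congr_left (fun m _ => ?_)
  rw [← hgrp, PySem.Dict.getD_foldl_modify_append l PySem.Dict.empty m]
  simp

-- the heart: grouping any lexicographically sorted rearrangement q of the pairs directly
-- equals A's sort-months-then-sort-each-bucket result on the original pairs
theorem pv_main (pairs q : List (String × String)) (hperm : q.Perm pairs)
    (hpw : q.Pairwise (fun p r => toLex p ≤ toLex r)) :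
    (PySem.List.sorted (pairs.foldl pvGrp PySem.Dict.empty).items (fun p => p.1) false).map
        (fun p => (p.1, PySem.List.sorted p.2 (fun f => f) false))
      = (q.foldl pvGrp PySem.Dict.empty).items := by
  rw [pv_group_items, pv_group_items]
  have hMBpermM0 : (PySem.Set.ofList (q.map (fun p => p.1))).Perm
      (PySem.Set.ofList (pairs.map (fun p => p.1))) := by
    rw [List.perm_ext_iff_of_nodup (PySem.Set.nodup_ofList _) (PySem.Set.nodup_ofList _)]
    intro a
    rw [PySem.Set.mem_ofList, PySem.Set.mem_ofList]
    exact (hperm.map (fun p => p.1)).mem_iff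
  have hqfst : (q.map (fun p => p.1)).Pairwise (fun a b => a ≤ b) := by
    rw [List.pairwise_map]
    refine hpw.imp (fun {p r} h => ?_)
    rcases Prod.Lex.le_iff.mp h with h' | ⟨h', _⟩
    · exact le_of_lt h'
    · exact le_of_eq h'
  have hMBlt : (PySem.Set.ofList (q.map (fun p => p.1))).Pairwise (fun a b => a < b) :=
    pv_pairwise_lt_of_le_nodup (hqfst.sublist (pv_ofList_sublist _)) (PySem.Set.nodup_ofList _)
  have hsortM :
      PySem.List.sorted ((PySem.Set.ofList (pairs.map (fun p => p.1))).map
          (fun m => (m, (pairs.filter (fun p => p.1 == m)).map (fun p => p.2))))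
          (fun p => p.1) false
        = (PySem.Set.ofList (q.map (fun p => p.1))).map
            (fun m => (m, (pairs.filter (fun p => p.1 == m)).map (fun p => p.2))) := by
    apply PySem.List.sorted_eq_of_perm_of_pairwise_lt
    · exact hMBpermM0.map _
    · rw [List.pairwise_map]; exact hMBlt
  rw [hsortM, List.map_map]
  refine List.map_congr_left (fun m _ => ?_)
  simp only [Function.comp]
  congr 1
  -- per-month file lists: the filtered slice of q is already sorted
  apply PySem.List.sorted_id_eq_of_perm_of_pairwise
  · exact (hperm.filter (fun p => p.1 == m)).map (fun p => p.2)
  · rw [List.pairwise_map]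
    refine (hpw.filter (fun p => p.1 == m)).imp_of_mem (fun {p r} hp hr h => ?_)
    have hpm : p.1 = m := by simpa using (List.of_mem_filter hp)
    have hrm : r.1 = m := by simpa using (List.of_mem_filter hr)
    rcases Prod.Lex.le_iff.mp h with h' | ⟨_, h'⟩
    · simp only [ofLex_toLex] at h'
      rw [hpm, hrm] at h'; exact absurd h' (lt_irrefl m)
    · simpa using h'

-- ===== VERDICT (by name: the statement is the Claim_ definition above) =====
theorem bucket_files_by_month_py_spec : Claim_equal_bucket_files_by_month_py := by
  intro assets _ _
  unfold Spec_bucket_files_by_month_py bucket_files_by_month_py bucket_files_by_month_py_alt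
  have hfoldA : ∀ (l : List (List (String × String))),
      l.foldl (fun d asset => d.modify (pvItem asset "capture_month") []
          (fun fs => fs ++ [pvItem asset "file"])) PySem.Dict.empty
        = (l.map pvKey2).foldl pvGrp PySem.Dict.empty := by
    intro l; rw [List.foldl_map]; rfl
  rw [hfoldA assets, hfoldA (PySem.List.sorted2 assets _ _ false)]
  apply pv_main
  · exact (PySem.List.sorted2_perm assets _ _ false).map pvKey2
  · rw [pv_sorted2_eq_sorted_lex, List.pairwise_map]
    have := PySem.List.sorted_pairwise assets
      (fun a => toLex (pvItem a "capture_month", pvItem a "file"))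
    exact this.imp (fun {a b} h => h)
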